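-- pv_equiv track=rewrite | github.com/shreyaspadhye3011/leetcode | coding-rounds/pocket gems - whole_minute.py | wholeMinute
-- ===== SOURCE A (Python) =====
-- def wholeMinute(songs):
--     count = 0
--     songs = list(map(lambda x: x%60, songs))
--     for i in range(0, len(songs)):
--         if songs[i] == 0:
--             count += songs[i+1:].count(0)
--         else:
--             count += songs[i+1:].count(60 - songs[i])
--     return count
-- ===== SOURCE B (Python) =====
-- def wholeMinute(songs):
--     count = 0
--     freq = {}
--     for s in songs:
--         r = s % 60
--         count += freq.get((60 - r) % 60, 0)
--         freq[r] = freq.get(r, 0) + 1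
--     return count
-- ===== Notes on version B (the rewrite author's own statement) =====
-- stated objective: faster
-- what changed: replaced the quadratic loop that counts complements in the remaining suffix for every index by a single pass that looks up the complement remainder in a frequency dictionary of the prefix
import Mathlib
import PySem

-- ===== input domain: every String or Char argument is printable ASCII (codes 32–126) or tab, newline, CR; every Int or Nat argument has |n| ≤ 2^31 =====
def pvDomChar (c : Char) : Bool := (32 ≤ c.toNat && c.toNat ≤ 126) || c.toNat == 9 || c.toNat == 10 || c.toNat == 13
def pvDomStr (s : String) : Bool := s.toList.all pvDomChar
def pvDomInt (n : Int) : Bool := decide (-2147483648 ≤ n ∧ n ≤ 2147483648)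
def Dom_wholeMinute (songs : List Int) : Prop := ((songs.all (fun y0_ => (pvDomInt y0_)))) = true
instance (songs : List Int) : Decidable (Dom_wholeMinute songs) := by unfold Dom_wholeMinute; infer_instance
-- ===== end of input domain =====

-- B replaces A's quadratic suffix-count loop with one pass over a remainder-frequency dictionary (asymptotically faster).


-- ===== PORT A =====
def wholeMinute (songs : List Int) : Int :=
  let songs2 := songs.map (fun x => PySem.Int.mod x 60)
  (PySem.List.pyRange 0 (PySem.List.len songs2) 1).foldl (fun (count : Int) i =>
    if PySem.List.pyGetD songs2 i 0 = 0 then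
      count + PySem.List.count (PySem.List.slice songs2 (some (i + 1)) none) 0
    else
      count + PySem.List.count (PySem.List.slice songs2 (some (i + 1)) none)
        (60 - PySem.List.pyGetD songs2 i 0)) 0

-- ===== PORT B =====
def wholeMinute_alt (songs : List Int) : Int :=
  (songs.foldl (fun (st : Int × PySem.Dict Int Int) s =>
      let r := PySem.Int.mod s 60
      (st.1 + st.2.getD (PySem.Int.mod (60 - r) 60) 0,
       st.2.insert r (st.2.getD r 0 + 1))) (0, PySem.Dict.empty)).1

-- ===== PRECONDITION & SPEC =====
def Spec_wholeMinute (songs : List Int) (out : Int) : Prop := out = wholeMinute_alt songs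
instance (songs : List Int) (out : Int) : Decidable (Spec_wholeMinute songs out) := by unfold Spec_wholeMinute; infer_instance

-- ===== CLAIM (what is proved, stated in full; the proofs are below) =====
def Claim_equal_wholeMinute : Prop := ∀ (songs : List Int), Dom_wholeMinute songs → Spec_wholeMinute songs (wholeMinute songs)

-- ===== LEMMAS AND PROOFS =====

-- the complement remainder (60 - r) % 60
def pvComp (r : Int) : Int := PySem.Int.mod (60 - r) 60

-- reference count of whole-minute pairs over an already-reduced list of remainders
def pvPairs : List Int → Int
  | [] => 0
  | r :: rs => (rs.count (pvComp r) : Int) + pvPairs rs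

theorem pvComp_eq (r : Int) (h0 : 0 ≤ r) (h1 : r < 60) :
    pvComp r = if r = 0 then 0 else 60 - r := by
  unfold pvComp
  rw [PySem.Int.mod_eq_emod_of_pos (by omega)]
  split_ifs with h <;> omega

theorem pvComp_comm (a b : Int) (ha0 : 0 ≤ a) (ha1 : a < 60) (hb0 : 0 ≤ b) (hb1 : b < 60) :
    (pvComp a = b) ↔ (a = pvComp b) := by
  rw [pvComp_eq a ha0 ha1, pvComp_eq b hb0 hb1]
  split_ifs <;> omega

-- A's indexed loop equals pvPairs on a list of remainders
theorem A_loop (xs : List Int) : (∀ r ∈ xs, 0 ≤ r ∧ r < 60) → ∀ (acc : Int),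
    (PySem.List.pyRange 0 (PySem.List.len xs) 1).foldl (fun (count : Int) i =>
      if PySem.List.pyGetD xs i 0 = 0 then
        count + PySem.List.count (PySem.List.slice xs (some (i + 1)) none) 0
      else
        count + PySem.List.count (PySem.List.slice xs (some (i + 1)) none)
          (60 - PySem.List.pyGetD xs i 0)) acc = acc + pvPairs xs := by
  induction xs with
  | nil =>
    intro _ acc
    rw [PySem.List.pyRange_one_eq_nil (by simp [PySem.List.len_eq])]
    simp [pvPairs]
  | cons x xs ih =>
    intro hx acc
    have hx0 := hx x List.mem_cons_self
    have hx' : ∀ r ∈ xs, 0 ≤ r ∧ r < 60 := fun r hr => hx r (List.mem_cons_of_mem _ hr)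
    rw [PySem.List.pyRange_one_cons (by simp [PySem.List.len_eq]; try omega)]
    rw [List.foldl_cons]
    have hhead : (if PySem.List.pyGetD (x :: xs) 0 0 = 0 then
        acc + PySem.List.count (PySem.List.slice (x :: xs) (some (0 + 1)) none) 0
      else
        acc + PySem.List.count (PySem.List.slice (x :: xs) (some (0 + 1)) none)
          (60 - PySem.List.pyGetD (x :: xs) 0 0))
        = acc + (xs.count (pvComp x) : Int) := by
      norm_num [PySem.List.pyGetD_zero_cons, PySem.List.count_eq, PySem.List.slice_from_one]
      rw [pvComp_eq x hx0.1 hx0.2]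
      split_ifs with h <;> rfl
    rw [hhead]
    have hlen1 : (PySem.List.len (x :: xs) - 1).toNat = xs.length := by
      simp [PySem.List.len_eq]
    have hshift : PySem.List.pyRange (0 + 1) (PySem.List.len (x :: xs)) 1
        = (List.range xs.length).map (fun (k : Nat) => (1 : Int) + (k : Int)) := by
      rw [PySem.List.pyRange_one]
      norm_num [PySem.List.len_eq]
    have hlen0 : (PySem.List.len xs - 0).toNat = xs.length := by
      simp [PySem.List.len_eq]
    have ih' := ih hx' (acc + (xs.count (pvComp x) : Int))
    rw [PySem.List.pyRange_one, hlen0, List.foldl_map] at ih'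
    rw [hshift, List.foldl_map]
    have hfun : (fun (c : Int) (k : Nat) =>
        if PySem.List.pyGetD (x :: xs) ((1 : Int) + (k : Int)) 0 = 0 then
          c + PySem.List.count (PySem.List.slice (x :: xs) (some ((1 : Int) + (k : Int) + 1)) none) 0
        else
          c + PySem.List.count (PySem.List.slice (x :: xs) (some ((1 : Int) + (k : Int) + 1)) none)
            (60 - PySem.List.pyGetD (x :: xs) ((1 : Int) + (k : Int)) 0))
        = (fun (c : Int) (k : Nat) =>
        if PySem.List.pyGetD xs ((0 : Int) + (k : Int)) 0 = 0 then
          c + PySem.List.count (PySem.List.slice xs (some ((0 : Int) + (k : Int) + 1)) none) 0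
        else
          c + PySem.List.count (PySem.List.slice xs (some ((0 : Int) + (k : Int) + 1)) none)
            (60 - PySem.List.pyGetD xs ((0 : Int) + (k : Int)) 0)) := by
      funext c k
      have e1 : (1 : Int) + (k : Int) = ((k + 1 : Nat) : Int) := by push_cast; ring
      have e2 : ((k + 1 : Nat) : Int) + 1 = ((k + 2 : Nat) : Int) := by push_cast; ring
      have e3 : (0 : Int) + (k : Int) = ((k : Nat) : Int) := by ring
      have e4 : ((k : Nat) : Int) + 1 = ((k + 1 : Nat) : Int) := by push_cast; ring
      rw [e1, e2, e3, e4, PySem.List.pyGetD_natCast, PySem.List.pyGetD_natCast,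
        PySem.List.slice_from_natCast, PySem.List.slice_from_natCast]
      simp only [List.getD_cons_succ, List.drop_succ_cons]
    rw [hfun, ih']
    simp [pvPairs]
    ring

-- effect on the sum when the frequency of remainder r is bumped by one
theorem pvSum_bump (xs : List Int) (f : Int → Int) (r : Int) (hr0 : 0 ≤ r) (hr1 : r < 60) :
    (xs.map (fun x => if pvComp (PySem.Int.mod x 60) = r then f r + 1
        else f (pvComp (PySem.Int.mod x 60)))).sum
    = (xs.map (fun x => f (pvComp (PySem.Int.mod x 60)))).sum
      + ((xs.map (fun x => PySem.Int.mod x 60)).count (pvComp r) : Int) := by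
  induction xs with
  | nil => simp
  | cons x xs ih =>
    have hm0 : 0 ≤ PySem.Int.mod x 60 := PySem.Int.mod_nonneg x (by omega)
    have hm1 : PySem.Int.mod x 60 < 60 := PySem.Int.mod_lt x (by omega)
    have hiff := pvComp_comm (PySem.Int.mod x 60) r hm0 hm1 hr0 hr1
    simp only [List.map_cons, List.sum_cons, List.count_cons, ih, beq_iff_eq]
    split_ifs with hA hB hB
    · rw [hA]; push_cast; ring
    · exact absurd (hiff.mp hA) hB
    · exact absurd (hiff.mpr hB) hA
    · push_cast; ring

-- B's pass with an abstract frequency function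
theorem B_loop (xs : List Int) (cnt : Int) (d : PySem.Dict Int Int) (f : Int → Int)
    (hd : ∀ r, d.getD r 0 = f r) :
    (xs.foldl (fun (st : Int × PySem.Dict Int Int) s =>
      let r := PySem.Int.mod s 60
      (st.1 + st.2.getD (PySem.Int.mod (60 - r) 60) 0,
       st.2.insert r (st.2.getD r 0 + 1))) (cnt, d)).1
    = cnt + ((xs.map (fun x => f (pvComp (PySem.Int.mod x 60)))).sum)
        + pvPairs (xs.map (fun x => PySem.Int.mod x 60)) := by
  induction xs generalizing cnt d f with
  | nil => simp [pvPairs]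
  | cons s xs ih =>
    have hr0 : 0 ≤ PySem.Int.mod s 60 := PySem.Int.mod_nonneg s (by omega)
    have hr1 : PySem.Int.mod s 60 < 60 := PySem.Int.mod_lt s (by omega)
    simp only [List.foldl_cons]
    rw [ih (cnt + d.getD (PySem.Int.mod (60 - PySem.Int.mod s 60) 60) 0)
        (d.insert (PySem.Int.mod s 60) (d.getD (PySem.Int.mod s 60) 0 + 1))
        (fun r' => if r' = PySem.Int.mod s 60 then f (PySem.Int.mod s 60) + 1 else f r')
        (by
          intro r'
          rw [PySem.Dict.getD_insert]
          by_cases h : r' = PySem.Int.mod s 60 <;> simp [h, hd])]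
    have hsum := pvSum_bump xs f (PySem.Int.mod s 60) hr0 hr1
    simp only [List.map_cons, List.sum_cons]
    have hcompd : d.getD (PySem.Int.mod (60 - PySem.Int.mod s 60) 60) 0
        = f (pvComp (PySem.Int.mod s 60)) := by rw [hd]; rfl
    simp only [pvPairs, hcompd]
    rw [hsum]
    ring

-- ===== VERDICT (by name: the statement is the Claim_ definition above) =====
theorem wholeMinute_spec : Claim_equal_wholeMinute := by
  intro songs _
  unfold Spec_wholeMinute
  have hms : ∀ r ∈ songs.map (fun x => PySem.Int.mod x 60), 0 ≤ r ∧ r < 60 := by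
    intro r hr
    rcases List.mem_map.mp hr with ⟨x, -, rfl⟩
    exact ⟨PySem.Int.mod_nonneg x (by omega), PySem.Int.mod_lt x (by omega)⟩
  have hA := A_loop (songs.map (fun x => PySem.Int.mod x 60)) hms 0
  have hB := B_loop songs 0 PySem.Dict.empty (fun _ => 0) (fun r => by simp)
  have hsum : (songs.map (fun x => (fun _ : Int => (0 : Int)) (pvComp (PySem.Int.mod x 60)))).sum = 0 := by
    simp
  rw [hsum] at hB
  show wholeMinute songs = wholeMinute_alt songs
  unfold wholeMinute wholeMinute_alt
  rw [hA, hB]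
  simp
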